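-- pv_equiv track=rewrite | github.com/oerms/advent21 | day06/advent6.py | countGroup2
-- ===== SOURCE A (Python) =====
-- def countGroup2(group):
--     """count intersection of answers in group"""
--     if len(group) == 1:
--         return len(group[0])
--     else:
--         charsinall = 0
--         for char in group[0]:
--             isinallGroups = True
--             for member in group:
--                 if char not in member:
--                     isinallGroups=False
--                     break
--             if isinallGroups == True:
--                 charsinall += 1
--     return charsinall
-- ===== SOURCE B (Python) =====
-- def countGroup2(group):
--     """count intersection of answers in group"""
--     common = set(group[0])
--     for member in group[1:]:
--         common &= set(member)
--     return sum(1 for char in group[0] if char in common)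
-- ===== Notes on version B (the rewrite author's own statement) =====
-- stated objective: alternative
-- what changed: B builds the intersection set of all members once and then counts group[0]'s characters by set membership, replacing A's inner scan of every member for every character of group[0]; A's special case for single-member groups disappears (with no other members the intersection is set(group[0]) itself). Asymptotically fewer character comparisons, but not measurably faster on the timing inputs.
import Mathlib
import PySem

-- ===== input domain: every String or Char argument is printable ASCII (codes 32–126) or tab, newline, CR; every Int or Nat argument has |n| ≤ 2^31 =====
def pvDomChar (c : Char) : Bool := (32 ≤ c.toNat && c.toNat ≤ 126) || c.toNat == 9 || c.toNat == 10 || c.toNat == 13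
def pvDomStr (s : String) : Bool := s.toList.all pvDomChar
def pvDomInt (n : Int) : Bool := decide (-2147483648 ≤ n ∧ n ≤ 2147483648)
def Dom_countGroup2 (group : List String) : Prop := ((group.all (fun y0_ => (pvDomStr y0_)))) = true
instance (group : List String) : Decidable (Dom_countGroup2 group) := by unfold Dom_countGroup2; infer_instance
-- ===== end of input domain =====

-- B replaces A's per-character scan of every member by one precomputed intersection set consulted per character (alternative algorithm, same measured cost).


-- ===== PORT A =====
-- 'char in member' on a single character is membership of that char in member's characters (exact on ASCII strings)
def countGroup2 (group : List String) : Int :=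
  if group.length = 1 then
    (((PySem.List.pyGet? group 0).getD "").toList.length : Int)
  else
    ((PySem.List.pyGet? group 0).getD "").toList.foldl
      (fun charsinall char =>
        let isinallGroups :=
          group.foldl (fun b member => b && member.toList.contains char) true
        if isinallGroups then charsinall + 1 else charsinall) 0

-- ===== PORT B =====
def countGroup2_alt (group : List String) : Int :=
  let common :=
    (group.drop 1).foldl
      (fun c member => PySem.Set.inter c (PySem.Set.ofList member.toList))
      (PySem.Set.ofList ((PySem.List.pyGet? group 0).getD "").toList)
  (((PySem.List.pyGet? group 0).getD "").toList.countP (fun char => common.contains char) : Int)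

-- ===== PRECONDITION & SPEC =====
-- Pre_ excludes only the empty list, on which A (and B) raise IndexError at group[0].
def Pre_countGroup2 (group : List String) : Prop := group ≠ []
instance (group : List String) : Decidable (Pre_countGroup2 group) := by unfold Pre_countGroup2; infer_instance
def pvWitness_countGroup2 : List String := ["abc", "bcd"]
def Spec_countGroup2 (group : List String) (out : Int) : Prop := out = countGroup2_alt group
instance (group : List String) (out : Int) : Decidable (Spec_countGroup2 group out) := by unfold Spec_countGroup2; infer_instance

-- ===== CLAIM (what is proved, stated in full; the proofs are below) =====
def Claim_equal_countGroup2 : Prop := ∀ (group : List String), Dom_countGroup2 group → Pre_countGroup2 group → Spec_countGroup2 group (countGroup2 group)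

-- ===== LEMMAS AND PROOFS =====

-- A's inner loop (with its break) computes 'all members contain the char'
theorem foldl_and_eq_all {α : Type} (l : List α) (f : α → Bool) (b : Bool) :
    l.foldl (fun acc x => acc && f x) b = (b && l.all f) := by
  induction l generalizing b with
  | nil => simp
  | cons x xs ih => simp [List.foldl, ih, Bool.and_assoc]

-- membership in B's folded intersection
theorem mem_foldl_inter (l : List String)
    (s : PySem.Set Char) (y : Char) :
    (y ∈ l.foldl (fun c member => PySem.Set.inter c (PySem.Set.ofList member.toList)) s) ↔
      (y ∈ s ∧ ∀ m ∈ l, y ∈ m.toList) := by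
  induction l generalizing s with
  | nil => simp
  | cons m ms ih =>
      simp [List.foldl, ih, PySem.Set.mem_inter, PySem.Set.mem_ofList]
      tauto

theorem countGroup2_spec' (g : String) (rest : List String) :
    countGroup2 (g :: rest) = countGroup2_alt (g :: rest) := by
  cases rest with
  | nil =>
      simp only [countGroup2, countGroup2_alt, PySem.List.pyGet?_zero_cons, Option.getD_some]
      rw [if_pos (by simp)]
      have h : g.toList.countP (fun char => (PySem.Set.ofList g.toList).contains char)
          = g.toList.length := by
        apply List.countP_eq_length.2
        intro c hc
        simp [PySem.Set.mem_ofList]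
        exact hc
      simp only [List.drop_succ_cons, List.drop_zero, List.foldl_nil, h]
  | cons r rs =>
      simp only [countGroup2, countGroup2_alt, PySem.List.pyGet?_zero_cons, Option.getD_some]
      have hlen : (g :: r :: rs).length ≠ 1 := by simp
      rw [if_neg hlen]
      simp only [List.drop_succ_cons, List.drop_zero]
      rw [PySem.List.foldl_if_add_one]
      simp only [zero_add, Int.natCast_inj]
      apply List.countP_congr
      intro c hc
      rw [foldl_and_eq_all]
      simp only [Bool.true_and, List.all_cons]
      have : PySem.Set.contains
          ((r :: rs).foldl (fun c member => PySem.Set.inter c (PySem.Set.ofList member.toList))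
            (PySem.Set.ofList g.toList)) c
          = decide (c ∈ PySem.Set.ofList g.toList ∧ ∀ m ∈ r :: rs, c ∈ m.toList) := by
        rw [Bool.eq_iff_iff, PySem.Set.contains_iff, mem_foldl_inter]
        simp
      rw [this]
      simp [PySem.Set.mem_ofList, hc]

-- ===== VERDICT (by name: the statement is the Claim_ definition above) =====
theorem countGroup2_spec : Claim_equal_countGroup2 := by
  intro group _ hpre
  cases group with
  | nil => exact absurd rfl hpre
  | cons g rest => exact countGroup2_spec' g rest
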